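-- pv_equiv track=rewrite | github.com/FYWinds/WynntilsResolver | src/wynntilsresolver/item.py | parse_powders
-- ===== SOURCE A (Python) =====
-- from typing import Dict, List, Tuple, Union
--
-- Data = List[int]
--
-- _POWDER_ELEMENTS = ["E", "T", "W", "F", "A"]
--
-- def parse_powders(data: Data):
--     # Powders
--     if data[0] != 4:
--         raise ValueError(f"Corrupted Block Indicator: {data[0]} - powders")
--     powder_bytes = data[1]
--
--     # change the bytes to binary and pad it to 8 bits
--     powder_binary = "".join([format(powder, "b").zfill(8) for powder in data[2 : 2 + powder_bytes]])
--     # 5 bit per powder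
--     powders_raw = [powder_binary[i : i + 5] for i in range(0, len(powder_binary), 5)]
--     # convert to int
--     powders_bin = [int(powder, 2) for powder in powders_raw]
--     powders = [f"{_POWDER_ELEMENTS[powder // 6]}{powder % 6}" for powder in powders_bin]
--
--     return powders, data[2 + powder_bytes :]
-- ===== SOURCE B (Python) =====
-- _POWDER_ELEMENTS = ["E", "T", "W", "F", "A"]
--
--
-- def parse_powders(data):
--     # Powders
--     if data[0] != 4:
--         raise ValueError(f"Corrupted Block Indicator: {data[0]} - powders")
--     powder_bytes = data[1]
--     block = data[2 : 2 + powder_bytes]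
--     # one big-endian integer instead of a binary string; 5-bit groups by shifting
--     num = int.from_bytes(bytes(block), "big")
--     total = 8 * len(block)
--     powders = []
--     for j in range((total + 4) // 5):
--         rem = total - 5 * j
--         v = (num >> (rem - 5)) & 31 if rem >= 5 else num & ((1 << rem) - 1)
--         powders.append(f"{_POWDER_ELEMENTS[v // 6]}{v % 6}")
--     return powders, data[2 + powder_bytes :]
-- ===== Notes on version B (the rewrite author's own statement) =====
-- stated objective: alternative
-- what changed: Replaces A's binary-string pipeline (format/zfill/join, slice into 5-char chunks, int(chunk,2)) by one big-endian integer built with int.from_bytes and direct 5-bit extraction via shifts and masks.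
-- outside the precondition, e.g. on parse_powders([4, 1, 256]): A returns (['W4', 'E0'], []), B raises ValueError; on parse_powders([4, 1, -2]): A returns (['E0', 'E2'], []), B raises ValueError
import Mathlib
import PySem

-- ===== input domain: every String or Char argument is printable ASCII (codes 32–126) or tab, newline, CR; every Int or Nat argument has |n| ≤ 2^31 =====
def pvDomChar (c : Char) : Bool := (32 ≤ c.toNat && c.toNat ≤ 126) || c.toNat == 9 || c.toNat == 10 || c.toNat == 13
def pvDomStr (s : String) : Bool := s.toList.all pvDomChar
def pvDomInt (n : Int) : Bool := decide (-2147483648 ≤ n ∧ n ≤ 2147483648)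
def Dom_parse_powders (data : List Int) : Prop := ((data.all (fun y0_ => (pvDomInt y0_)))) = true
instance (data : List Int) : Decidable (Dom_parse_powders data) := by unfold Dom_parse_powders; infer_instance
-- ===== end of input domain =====

-- B replaces A's binary-string pipeline (format/zfill/join, 5-char chunks, int(chunk,2)) by one
-- big-endian integer (int.from_bytes) and direct 5-bit extraction with shifts and masks
-- (objective: alternative, same asymptotic cost).

-- ===== PORT A =====
def pvPE : List String := ["E", "T", "W", "F", "A"]

-- format(powder, "b"): binary digits without leading zeros, '-' sign for negatives
def pvFormatB (n : Int) : List Char :=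
  if n < 0 then '-' :: Nat.toDigits 2 n.natAbs else Nat.toDigits 2 n.toNat

-- str.zfill(8): pad with '0' on the left to width 8, after a leading sign
def pvZfill8 (s : List Char) : List Char :=
  if 8 ≤ s.length then s
  else match s with
    | c :: rest => if c = '-' ∨ c = '+' then c :: (List.replicate (8 - s.length) '0' ++ rest)
                   else List.replicate (8 - s.length) '0' ++ s
    | [] => List.replicate 8 '0'

-- [binary[i : i + 5] for i in range(0, len(binary), 5)]
def pvChunk5 (l : List Char) : List (List Char) :=
  match l with
  | [] => []
  | c :: rest => ((c :: rest).take 5) :: pvChunk5 ((c :: rest).drop 5)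
  termination_by l.length
  decreasing_by simp

def parse_powders (data : List Int) : List String × List Int :=
  if PySem.List.pyGetD data 0 0 ≠ 4 then ([], [])  -- raise ValueError: excluded by Pre_
  else
    let powder_bytes := PySem.List.pyGetD data 1 0
    let powder_binary :=
      ((PySem.List.slice data (some 2) (some (2 + powder_bytes))).map
        (fun p => pvZfill8 (pvFormatB p))).flatten
    let powders_raw := pvChunk5 powder_binary
    -- int(chunk, 2): none (ValueError) excluded by Pre_
    let powders_bin := powders_raw.map (fun c => (PySem.Int.ofCharsBase? c 2).getD 0)
    -- _POWDER_ELEMENTS[powder // 6]: out-of-range (IndexError) excluded by Pre_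
    let powders := powders_bin.map (fun p =>
      PySem.List.pyGetD pvPE (PySem.Int.floordiv p 6) "" ++ PySem.Int.toStr (PySem.Int.mod p 6))
    (powders, PySem.List.slice data (some (2 + powder_bytes)) none)

-- ===== PORT B =====
def parse_powders_alt (data : List Int) : List String × List Int :=
  if PySem.List.pyGetD data 0 0 ≠ 4 then ([], [])  -- raise ValueError: excluded by Pre_
  else
    let powder_bytes := PySem.List.pyGetD data 1 0
    let block := PySem.List.slice data (some 2) (some (2 + powder_bytes))
    -- int.from_bytes(bytes(block), "big"); bytes() needs 0..255 (Pre_), so the value is a Nat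
    let num : Nat := block.foldl (fun a b => 256 * a + b.toNat) 0
    let total : Nat := 8 * block.length
    let powders := (List.range ((total + 4) / 5)).map (fun j =>
      -- rem = total - 5*j ≥ 1 inside the loop, so Nat subtraction is exact
      let v : Nat := if 5 * j + 5 ≤ total then (num >>> (total - 5 * j - 5)) &&& 31
                     else num &&& ((1 <<< (total - 5 * j)) - 1)
      PySem.List.pyGetD pvPE (PySem.Int.floordiv (v : Int) 6) "" ++ PySem.Int.toStr (PySem.Int.mod (v : Int) 6))
    (powders, PySem.List.slice data (some (2 + powder_bytes)) none)

-- ===== PRECONDITION & SPEC =====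
-- helpers naming the powder byte block of the input and its 5-bit groups (input shape only)
def pvBlock (data : List Int) : List Int :=
  PySem.List.slice data (some 2) (some (2 + PySem.List.pyGetD data 1 0))
def pvNum (data : List Int) : Nat := (pvBlock data).foldl (fun a b => 256 * a + b.toNat) 0
def pvGroup (data : List Int) (j : Nat) : Nat :=
  if 5 * j + 5 ≤ 8 * (pvBlock data).length
  then (pvNum data >>> (8 * (pvBlock data).length - 5 * j - 5)) % 32
  else pvNum data % 2 ^ (8 * (pvBlock data).length - 5 * j)

-- Pre_ excludes: data with fewer than 2 entries or data[0] ≠ 4 (A raises ValueError/IndexError);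
-- any 5-bit group ≥ 30 (A raises IndexError on _POWDER_ELEMENTS[powder // 6]); and powder-block
-- entries outside 0..255 — there A's variable-width format(p,"b") string is not a byte block (its
-- grouping is accidental) and B raises ValueError in bytes(), so those values are unmatchable.
def Pre_parse_powders (data : List Int) : Prop :=
  2 ≤ data.length ∧ PySem.List.pyGetD data 0 0 = 4 ∧
  (∀ b ∈ pvBlock data, 0 ≤ b ∧ b < 256) ∧
  (∀ j < (8 * (pvBlock data).length + 4) / 5, pvGroup data j < 30)
instance (data : List Int) : Decidable (Pre_parse_powders data) := by
  unfold Pre_parse_powders; infer_instance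

def pvWitness_parse_powders : List Int := [4, 1, 37]

def Spec_parse_powders (data : List Int) (out : List String × List Int) : Prop := out = parse_powders_alt data
instance (data : List Int) (out : List String × List Int) : Decidable (Spec_parse_powders data out) := by unfold Spec_parse_powders; infer_instance

-- ===== CLAIM (what is proved, stated in full; the proofs are below) =====
def Claim_equal_parse_powders : Prop := ∀ (data : List Int), Dom_parse_powders data → Pre_parse_powders data → Spec_parse_powders data (parse_powders data)

-- ===== LEMMAS AND PROOFS =====

-- the T-bit big-endian binary string of n (characters '0'/'1', most significant first)
def pvBits (n T : Nat) : List Char :=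
  (List.range T).map (fun k => if n.testBit (T - 1 - k) then '1' else '0')

-- big-endian value of an (assumed byte) list
def pvVal : List Int → Nat
  | [] => 0
  | b :: r => b.toNat * 256 ^ r.length + pvVal r

-- B's j-th extracted 5-bit value (exactly the expression in parse_powders_alt)
def pvVN (num T j : Nat) : Nat :=
  if 5 * j + 5 ≤ T then (num >>> (T - 5 * j - 5)) &&& 31
  else num &&& ((1 <<< (T - 5 * j)) - 1)

lemma pv_hiBit (hi lo L j : Nat) (h : lo < 2 ^ L) :
    (hi * 2 ^ L + lo).testBit (L + j) = hi.testBit j := by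
  rw [Nat.testBit_eq_decide_div_mod_eq, Nat.testBit_eq_decide_div_mod_eq]
  rw [pow_add, ← Nat.div_div_eq_div_mul, mul_comm hi (2 ^ L),
    Nat.mul_add_div (by positivity), Nat.div_eq_of_lt h, Nat.add_zero]

lemma pv_loBit (hi lo L i : Nat) (h : i < L) :
    (hi * 2 ^ L + lo).testBit i = lo.testBit i := by
  rw [Nat.testBit_eq_decide_div_mod_eq, Nat.testBit_eq_decide_div_mod_eq]
  have e : hi * 2 ^ L + lo = 2 ^ i * (2 * (hi * 2 ^ (L - i - 1))) + lo := by
    have : (2 : ℕ) ^ L = 2 ^ i * (2 * 2 ^ (L - i - 1)) := by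
      rw [← pow_succ', ← pow_add]
      congr 1
      omega
    rw [this]; ring
  rw [e, Nat.mul_add_div (by positivity), Nat.mul_add_mod]

set_option maxRecDepth 4096 in
lemma pv_byteBits : ∀ b < 256, pvZfill8 (pvFormatB (b : Nat)) = pvBits b 8 := by decide

lemma pv_binChunk : ∀ l < 6, ∀ v < 32,
    (PySem.Int.ofCharsBase? ((List.range l).map
        (fun k => if Nat.testBit v (l - 1 - k) then '1' else '0')) 2).getD 0
      = ((v % 2 ^ l : Nat) : Int) := by decide

lemma pv_foldl_eq_val : ∀ (block : List Int) (a : Nat),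
    block.foldl (fun a b => 256 * a + b.toNat) a = a * 256 ^ block.length + pvVal block := by
  intro block
  induction block with
  | nil => intro a; simp [pvVal]
  | cons b r ih =>
    intro a
    simp only [List.foldl_cons, ih, pvVal, List.length_cons]
    ring

lemma pv_val_lt : ∀ block : List Int, (∀ b ∈ block, b < 256) → pvVal block < 256 ^ block.length := by
  intro block
  induction block with
  | nil => intro _; simp [pvVal]
  | cons b r ih =>
    intro h
    have hb : b.toNat ≤ 255 := by
      have := h b (List.mem_cons_self ..)
      omega
    have hr := ih (fun x hx => h x (List.mem_cons_of_mem _ hx))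
    have h1 : b.toNat * 256 ^ r.length ≤ 255 * 256 ^ r.length :=
      Nat.mul_le_mul_right _ hb
    simp only [pvVal, List.length_cons, pow_succ]
    nlinarith

lemma pv_bits_split (hi lo M L : Nat) (hlo : lo < 2 ^ L) :
    pvBits (hi * 2 ^ L + lo) (M + L) = pvBits hi M ++ pvBits lo L := by
  unfold pvBits
  rw [List.range_add, List.map_append, List.map_map]
  congr 1
  · apply List.map_congr_left
    intro k hk
    simp only [List.mem_range] at hk
    have e : M + L - 1 - k = L + (M - 1 - k) := by omega
    rw [e, pv_hiBit _ _ _ _ hlo]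
  · apply List.map_congr_left
    intro k hk
    simp only [List.mem_range] at hk
    simp only [Function.comp_apply]
    have e : M + L - 1 - (M + k) = L - 1 - k := by omega
    rw [e, pv_loBit _ _ _ _ (by omega)]

lemma pv_flatten_bits : ∀ block : List Int, (∀ b ∈ block, 0 ≤ b ∧ b < 256) →
    (block.map (fun p => pvZfill8 (pvFormatB p))).flatten = pvBits (pvVal block) (8 * block.length) := by
  intro block
  induction block with
  | nil => intro _; simp [pvVal, pvBits]
  | cons b r ih =>
    intro h
    have hb := h b (List.mem_cons_self ..)
    have hr := fun x hx => h x (List.mem_cons_of_mem _ hx)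
    simp only [List.map_cons, List.flatten_cons, ih hr, pvVal, List.length_cons]
    have hbb : pvZfill8 (pvFormatB b) = pvBits b.toNat 8 := by
      have h8 := pv_byteBits b.toNat (by omega)
      rwa [Int.toNat_of_nonneg hb.1] at h8
    have h256 : (256 : Nat) ^ r.length = 2 ^ (8 * r.length) := by
      rw [show (256 : Nat) = 2 ^ 8 by norm_num, ← pow_mul]
    have hlo : pvVal r < 2 ^ (8 * r.length) := by
      rw [← h256]
      exact pv_val_lt r (fun x hx => (hr x hx).2)
    rw [hbb, h256, show 8 * (r.length + 1) = 8 + 8 * r.length by ring,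
      pv_bits_split b.toNat (pvVal r) 8 (8 * r.length) hlo]

lemma pv_bits_drop (n T : Nat) : (pvBits n T).drop 5 = pvBits n (T - 5) := by
  by_cases h : 5 ≤ T
  · unfold pvBits
    rw [← List.map_drop]
    have hr : List.range T = List.range 5 ++ (List.range (T - 5)).map (fun x => 5 + x) := by
      rw [← List.range_add]
      congr 1
      omega
    rw [hr, List.drop_left' (by simp), List.map_map]
    apply List.map_congr_left
    intro k hk
    simp only [Function.comp_apply]
    simp only [List.mem_range] at hk
    have e : T - 1 - (5 + k) = T - 5 - 1 - k := by omega
    rw [e]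
  · have h1 : (pvBits n T).length = T := by simp [pvBits]
    rw [List.drop_of_length_le (by omega)]
    have e : T - 5 = 0 := by omega
    simp [e, pvBits]

lemma pv_bits_take (n T : Nat) (h : 5 ≤ T) :
    (pvBits n T).take 5 = (List.range 5).map (fun k => if n.testBit (T - 1 - k) then '1' else '0') := by
  unfold pvBits
  rw [← List.map_take, List.take_range]
  have e : min 5 T = 5 := by omega
  rw [e]

lemma pv_chunk5_cons (l : List Char) (h : l ≠ []) :
    pvChunk5 l = l.take 5 :: pvChunk5 (l.drop 5) := by
  match l with
  | [] => exact absurd rfl h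
  | c :: rest => rw [pvChunk5]

lemma pv_vn_shift (n T j : Nat) (h : 1 ≤ T) : pvVN n T (j + 1) = pvVN n (T - 5) j := by
  unfold pvVN
  by_cases h5 : 5 ≤ T
  · have e2 : T - 5 * (j + 1) - 5 = T - 5 - 5 * j - 5 := by omega
    have e3 : T - 5 * (j + 1) = T - 5 - 5 * j := by omega
    rw [e2, e3]
    by_cases hc : 5 * j + 5 ≤ T - 5
    · rw [if_pos (by omega : 5 * (j + 1) + 5 ≤ T), if_pos hc]
    · rw [if_neg (by omega : ¬ 5 * (j + 1) + 5 ≤ T), if_neg hc]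
  · have e1 : T - 5 * (j + 1) = 0 := by omega
    have e2 : T - 5 - 5 * j = 0 := by omega
    have c1 : ¬ (5 * (j + 1) + 5 ≤ T) := by omega
    have c2 : ¬ (5 * j + 5 ≤ T - 5) := by omega
    simp [c1, c2, e1, e2]

lemma pv_head_val (n T : Nat) (hT : 1 ≤ T) :
    (PySem.Int.ofCharsBase? ((pvBits n T).take 5) 2).getD 0 = ((pvVN n T 0 : Nat) : Int) := by
  by_cases h5 : 5 ≤ T
  · rw [pv_bits_take n T h5]
    have hcongr : (List.range 5).map (fun k => if n.testBit (T - 1 - k) then '1' else '0')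
        = (List.range 5).map (fun k => if Nat.testBit ((n >>> (T - 5)) % 32) (5 - 1 - k) then '1' else '0') := by
      apply List.map_congr_left
      intro k hk
      simp only [List.mem_range] at hk
      have e : ((n >>> (T - 5)) % 32).testBit (5 - 1 - k) = n.testBit (T - 1 - k) := by
        rw [show (32 : Nat) = 2 ^ 5 by norm_num, Nat.testBit_mod_two_pow, Nat.testBit_shiftRight]
        have e2 : T - 5 + (5 - 1 - k) = T - 1 - k := by omega
        rw [e2]
        simp [show 5 - 1 - k < 5 by omega]
      rw [e]
    rw [hcongr, pv_binChunk 5 (by norm_num) _ (Nat.mod_lt _ (by norm_num))]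
    congr 1
    unfold pvVN
    rw [if_pos (by omega : 5 * 0 + 5 ≤ T)]
    rw [show (31 : Nat) = 2 ^ 5 - 1 by norm_num, Nat.and_two_pow_sub_one_eq_mod]
    have e : T - 5 * 0 - 5 = T - 5 := by omega
    rw [e]
    exact Nat.mod_mod_of_dvd _ (by norm_num)
  · have hlen : (pvBits n T).length = T := by simp [pvBits]
    rw [List.take_of_length_le (by omega)]
    have hcongr : pvBits n T
        = (List.range T).map (fun k => if Nat.testBit (n % 2 ^ T) (T - 1 - k) then '1' else '0') := by
      unfold pvBits
      apply List.map_congr_left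
      intro k hk
      simp only [List.mem_range] at hk
      have e : (n % 2 ^ T).testBit (T - 1 - k) = n.testBit (T - 1 - k) := by
        rw [Nat.testBit_mod_two_pow]
        simp [show T - 1 - k < T by omega]
      rw [e]
    rw [hcongr, pv_binChunk T (by omega) _ (by
      have h1 := Nat.mod_lt n (show 0 < 2 ^ T by positivity)
      have h2 : (2 : Nat) ^ T ≤ 2 ^ 5 := Nat.pow_le_pow_right (by norm_num) (by omega)
      omega)]
    congr 1
    unfold pvVN
    rw [if_neg (by omega : ¬ 5 * 0 + 5 ≤ T)]
    rw [Nat.one_shiftLeft, Nat.and_two_pow_sub_one_eq_mod]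
    have e : T - 5 * 0 = T := by omega
    rw [e]
    exact Nat.mod_mod_of_dvd _ dvd_rfl

lemma pv_chunk_vals : ∀ T n, (pvChunk5 (pvBits n T)).map (fun c => (PySem.Int.ofCharsBase? c 2).getD 0)
    = (List.range ((T + 4) / 5)).map (fun j => ((pvVN n T j : Nat) : Int)) := by
  intro T
  induction T using Nat.strong_induction_on with
  | _ T ih =>
    intro n
    by_cases hT : T = 0
    · subst hT
      simp [pvBits, pvChunk5]
    · have hne : pvBits n T ≠ [] := by
        have hlen : (pvBits n T).length = T := by simp [pvBits]
        intro hcon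
        rw [hcon] at hlen
        simp at hlen
        omega
      rw [pv_chunk5_cons _ hne, List.map_cons, pv_bits_drop, ih (T - 5) (by omega)]
      have hcount : (T + 4) / 5 = ((T - 5 + 4) / 5) + 1 := by omega
      rw [hcount, List.range_succ_eq_map, List.map_cons, List.map_map]
      congr 1
      · exact pv_head_val n T (by omega)
      · apply List.map_congr_left
        intro j hj
        simp only [Function.comp_apply]
        rw [show Nat.succ j = j + 1 from rfl, pv_vn_shift n T j (by omega)]

-- ===== VERDICT (by name: the statement is the Claim_ definition above) =====
theorem parse_powders_spec : Claim_equal_parse_powders := by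
  intro data _ hpre
  obtain ⟨hlen, hind, hbytes, hgroups⟩ := hpre
  unfold pvBlock at hbytes
  unfold Spec_parse_powders parse_powders parse_powders_alt
  have hc : ¬ (PySem.List.pyGetD data 0 0 ≠ 4) := not_not_intro hind
  rw [if_neg hc, if_neg hc]
  simp only [Prod.mk.injEq, and_true]
  generalize PySem.List.slice data (some 2) (some (2 + PySem.List.pyGetD data 1 0)) = block at hbytes ⊢
  rw [pv_flatten_bits block hbytes, pv_foldl_eq_val block 0, Nat.zero_mul, Nat.zero_add,
    pv_chunk_vals (8 * block.length) (pvVal block), List.map_map]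
  apply List.map_congr_left
  intro j hj
  simp only [Function.comp_apply, pvVN]
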